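-- pv_equiv track=rewrite | github.com/xsanfz/lesson1 | module_3_5.py | get_multiplied_digits
-- ===== SOURCE A (Python) =====
-- def get_multiplied_digits(number):
--
--     str_number = str(number)
--
--     if len(str_number) <= 1:
--         return int(str_number)
--
--     first = int(str_number[0])
--     rest_of_digits = str_number[1:]
--     if first == 0:
--         return get_multiplied_digits(str_number[1:])
--
--     last_digit = int(str_number[-1])
--
--     if last_digit == 0:
--         return get_multiplied_digits(str_number[:-1])
--
--     return first * get_multiplied_digits(rest_of_digits)
-- ===== SOURCE B (Python) =====
-- def get_multiplied_digits(number):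
--     s = str(number)
--     if len(s) <= 1:
--         return int(s)
--     product = 1
--     for ch in s:
--         d = int(ch)
--         if d != 0:
--             product *= d
--     return product
-- ===== Notes on version B (the rewrite author's own statement) =====
-- stated objective: simpler
-- what changed: Replaces A's three-way recursion on the decimal string (strip a leading zero digit / strip a trailing zero digit / multiply the first digit by the recursion on the rest) with a single left-to-right loop multiplying the nonzero digits, keeping A's single-character guard.
import Mathlib
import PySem

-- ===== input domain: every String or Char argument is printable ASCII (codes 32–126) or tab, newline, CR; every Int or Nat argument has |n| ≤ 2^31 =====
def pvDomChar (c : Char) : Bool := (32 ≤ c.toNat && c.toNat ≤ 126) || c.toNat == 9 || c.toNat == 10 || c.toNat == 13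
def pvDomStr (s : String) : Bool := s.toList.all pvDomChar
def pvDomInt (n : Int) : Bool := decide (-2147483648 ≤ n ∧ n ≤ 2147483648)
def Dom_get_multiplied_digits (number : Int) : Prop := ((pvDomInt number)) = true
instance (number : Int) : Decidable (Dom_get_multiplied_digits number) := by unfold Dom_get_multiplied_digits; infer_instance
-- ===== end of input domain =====

-- B replaces A's three-way recursion on the decimal string by a single left-to-right
-- pass multiplying the nonzero digits (objective: simpler).

-- ===== PORT A =====
-- int(ch) for a one-character string; 0 stands where Python raises ValueError (only outside Pre_)
def pvDigit (c : Char) : Int := (PySem.Int.ofChars? [c]).getD 0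

-- A's recursion: its recursive calls receive strings, and str() of a string is itself,
-- so the whole recursion lives on the character list.
def pvAuxA (s : List Char) : Int :=
  if h : s.length ≤ 1 then (PySem.Int.ofChars? s).getD 0
  else
    let first := pvDigit ((PySem.List.pyGet? s 0).getD ' ')       -- int(str_number[0])
    let rest := PySem.List.slice s (some 1) none                  -- str_number[1:]
    if first = 0 then pvAuxA rest
    else
      let last := pvDigit ((PySem.List.pyGet? s (-1)).getD ' ')   -- int(str_number[-1])
      if last = 0 then pvAuxA (PySem.List.slice s none (some (-1)))  -- str_number[:-1]
      else first * pvAuxA rest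
termination_by s.length
decreasing_by
  · simp [PySem.List.slice_from_one]; omega
  · simp [PySem.List.slice_to_neg_one]; omega
  · simp [PySem.List.slice_from_one]; omega

def get_multiplied_digits (number : Int) : Int :=
  pvAuxA (PySem.Int.toChars number)

-- ===== PORT B =====
def get_multiplied_digits_alt (number : Int) : Int :=
  let s := PySem.Int.toChars number
  if s.length ≤ 1 then (PySem.Int.ofChars? s).getD 0
  else s.foldl (fun p c => if pvDigit c ≠ 0 then p * pvDigit c else p) 1

-- ===== PRECONDITION & SPEC =====
-- A raises ValueError on every negative number (int('-') on the sign character); so does B.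
def Pre_get_multiplied_digits (number : Int) : Prop := 0 ≤ number
instance (number : Int) : Decidable (Pre_get_multiplied_digits number) := by
  unfold Pre_get_multiplied_digits; infer_instance

def pvWitness_get_multiplied_digits : Int := 105

def Spec_get_multiplied_digits (number : Int) (out : Int) : Prop := out = get_multiplied_digits_alt number
instance (number : Int) (out : Int) : Decidable (Spec_get_multiplied_digits number out) := by
  unfold Spec_get_multiplied_digits; infer_instance

-- ===== CLAIM (what is proved, stated in full; the proofs are below) =====
def Claim_equal_get_multiplied_digits : Prop := ∀ (number : Int), Dom_get_multiplied_digits number → Pre_get_multiplied_digits number → Spec_get_multiplied_digits number (get_multiplied_digits number)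

-- ===== LEMMAS AND PROOFS =====

-- the decimal digit characters of m, most significant first (proof-side mirror of Nat.toDigits 10)
def pvDecChars (m : Nat) : List Char :=
  if h : m < 10 then [Nat.digitChar m]
  else pvDecChars (m / 10) ++ [Nat.digitChar (m % 10)]
termination_by m
decreasing_by exact Nat.div_lt_self (by omega) (by omega)

lemma pvToDigitsCore_eq_decChars :
    ∀ (f n : Nat) (acc : List Char), n < f →
      Nat.toDigitsCore 10 f n acc = pvDecChars n ++ acc := by
  intro f
  induction f with
  | zero => intro n acc h; omega
  | succ f ih =>
    intro n acc h
    by_cases h10 : n < 10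
    · have hdiv : n / 10 = 0 := Nat.div_eq_of_lt h10
      have hmod : n % 10 = n := Nat.mod_eq_of_lt h10
      simp [Nat.toDigitsCore, hdiv, hmod, pvDecChars, h10]
    · have hdiv : n / 10 ≠ 0 := by omega
      have hlt : n / 10 < f := by
        have := Nat.div_lt_self (by omega : 0 < n) (by omega : 1 < 10)
        omega
      rw [show Nat.toDigitsCore 10 (f+1) n acc
            = Nat.toDigitsCore 10 f (n / 10) (Nat.digitChar (n % 10) :: acc) by
          simp [Nat.toDigitsCore, hdiv]]
      rw [ih (n / 10) _ hlt]
      conv_rhs => rw [pvDecChars]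
      simp [h10]
  
lemma pvToDigits_eq_decChars (m : Nat) : Nat.toDigits 10 m = pvDecChars m := by
  have := pvToDigitsCore_eq_decChars (m + 1) m [] (by omega)
  simpa [Nat.toDigits] using this

lemma pvToChars_nonneg (n : Int) (h : 0 ≤ n) :
    PySem.Int.toChars n = pvDecChars n.toNat := by
  simp [PySem.Int.toChars, pvToDigits_eq_decChars, show ¬ n < 0 by omega]

lemma pvDecChars_lt10 (m : Nat) (h : m < 10) : pvDecChars m = [Nat.digitChar m] := by
  rw [pvDecChars]; simp [h]

lemma pvDigit_digitChar (d : Nat) (h : d < 10) : pvDigit (Nat.digitChar d) = (d : Int) := by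
  interval_cases d <;> decide

lemma pvDecChars_exists_nonzero (m : Nat) (h : 0 < m) :
    ∃ c ∈ pvDecChars m, pvDigit c ≠ 0 := by
  by_cases h10 : m < 10
  · refine ⟨Nat.digitChar m, by simp [pvDecChars_lt10 m h10], ?_⟩
    rw [pvDigit_digitChar m h10]
    omega
  · have h0 : 0 < m / 10 := by omega
    have hlt : m / 10 < m := Nat.div_lt_self h (by omega)
    obtain ⟨c, hc, hnz⟩ := pvDecChars_exists_nonzero (m / 10) h0
    refine ⟨c, ?_, hnz⟩
    rw [pvDecChars]; simp [h10]
    exact Or.inl hc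
termination_by m

-- the body of B's loop
def pvStep (p : Int) (c : Char) : Int := if pvDigit c ≠ 0 then p * pvDigit c else p

lemma pvFoldl_step_mul (s : List Char) : ∀ a : Int, s.foldl pvStep a = a * s.foldl pvStep 1 := by
  induction s with
  | nil => intro a; simp [List.foldl]
  | cons c t ih =>
    intro a
    simp only [List.foldl]
    rw [ih (pvStep a c), ih (pvStep 1 c)]
    unfold pvStep
    by_cases h : pvDigit c ≠ 0 <;> simp [h] <;> ring

lemma pvFoldl_step_append_zero (l : List Char) (c : Char) (h : pvDigit c = 0) :
    (l ++ [c]).foldl pvStep 1 = l.foldl pvStep 1 := by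
  simp [List.foldl_append, pvStep, h]

lemma pvAuxA_single (c : Char) : pvAuxA [c] = pvDigit c := by
  rw [pvAuxA]; simp [pvDigit]

-- main invariant: on a nonempty string holding at least one character of nonzero digit value,
-- A's recursion computes the product of the nonzero digit values
lemma pvAuxA_eq_prod (s : List Char) (h1 : 1 ≤ s.length)
    (h2 : ∃ c ∈ s, pvDigit c ≠ 0) : pvAuxA s = s.foldl pvStep 1 := by
  by_cases hlen : s.length ≤ 1
  · have : s.length = 1 := by omega
    obtain ⟨c, rfl⟩ : ∃ c, s = [c] := by
      match s, this with | [c], _ => exact ⟨c, rfl⟩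
    obtain ⟨c', hc', hnz⟩ := h2
    simp at hc'; subst hc'
    rw [pvAuxA_single]
    simp [List.foldl, pvStep, hnz]
  · obtain ⟨c, t, rfl⟩ : ∃ c t, s = c :: t := by
      match s with | c :: t => exact ⟨c, t, rfl⟩
    have ht : 1 ≤ t.length := by simp only [List.length_cons] at hlen; omega
    rw [pvAuxA]
    simp only [hlen, dite_false]
    rw [PySem.List.slice_from_one]
    simp only [List.tail_cons, PySem.List.pyGet?_zero_cons, Option.getD_some]
    by_cases hc : pvDigit c = 0
    · -- first digit is 0: recurse on the tail
      have h2t : ∃ c' ∈ t, pvDigit c' ≠ 0 := by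
        obtain ⟨c', hc', hnz⟩ := h2
        simp at hc'
        rcases hc' with rfl | hmem
        · exact absurd hc hnz
        · exact ⟨c', hmem, hnz⟩
      rw [if_pos hc, pvAuxA_eq_prod t ht h2t]
      simp [List.foldl, pvStep, hc]
    · rw [if_neg hc]
      have hne : c :: t ≠ [] := by simp
      rw [PySem.List.pyGet?_neg_one]
      rw [List.getLast?_eq_some_getLast hne]
      simp only [Option.getD_some]
      set z := (c :: t).getLast hne with hz
      by_cases hlast : pvDigit z = 0
      · -- last digit is 0: recurse on dropLast
        rw [if_pos hlast, PySem.List.slice_to_neg_one]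
        have hsplit : c :: t = (c :: t).dropLast ++ [z] := by
          rw [hz]; exact (List.dropLast_append_getLast hne).symm
        have hdl : (c :: t).dropLast = c :: t.dropLast := by
          cases t with
          | nil => simp at ht
          | cons d u => simp
        have hd1 : 1 ≤ ((c :: t).dropLast).length := by rw [hdl]; simp
        have h2d : ∃ c' ∈ (c :: t).dropLast, pvDigit c' ≠ 0 := by
          refine ⟨c, ?_, hc⟩
          rw [hdl]; simp
        rw [pvAuxA_eq_prod ((c :: t).dropLast) hd1 h2d]
        conv_rhs => rw [hsplit]
        rw [pvFoldl_step_append_zero _ _ hlast]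
      · -- both ends nonzero: first * recurse on the tail
        rw [if_neg hlast]
        have hzt : z ∈ t := by
          cases t with
          | nil => simp at ht
          | cons d u =>
            have hz' : z = (d :: u).getLast (by simp) := by
              rw [hz]; simp [List.getLast_cons]
            rw [hz']; exact List.getLast_mem _
        have h2t : ∃ c' ∈ t, pvDigit c' ≠ 0 := ⟨z, hzt, hlast⟩
        rw [pvAuxA_eq_prod t ht h2t]
        simp only [List.foldl]
        rw [show pvStep 1 c = pvDigit c by simp [pvStep, hc]]
        rw [pvFoldl_step_mul t (pvDigit c)]
termination_by s.length
decreasing_by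
  all_goals (rename_i hst; subst hst; simp only [List.length_dropLast, List.length_cons]; omega)

lemma pvDecChars_long (m : Nat) (h : ¬ (pvDecChars m).length ≤ 1) : 0 < m := by
  by_contra h0
  have : m = 0 := by omega
  subst this
  rw [pvDecChars_lt10 0 (by omega)] at h
  simp at h

-- ===== VERDICT (by name: the statement is the Claim_ definition above) =====
theorem get_multiplied_digits_spec : Claim_equal_get_multiplied_digits := by
  intro number _ hpre
  unfold Spec_get_multiplied_digits get_multiplied_digits get_multiplied_digits_alt
  by_cases h : (PySem.Int.toChars number).length ≤ 1
  · rw [pvAuxA]; simp [h]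
  · simp only [h, if_false]
    rw [pvToChars_nonneg number hpre] at h ⊢
    have hm : 0 < number.toNat := pvDecChars_long _ h
    rw [show (fun (p : Int) (c : Char) => if pvDigit c ≠ 0 then p * pvDigit c else p) = pvStep from rfl]
    exact pvAuxA_eq_prod _ (by omega) (pvDecChars_exists_nonzero _ hm)
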